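-- pv_equiv track=rewrite | github.com/pypi-data/pypi-mirror-186 | packages/bodo/bodo-2023.1rc3-cp38-cp38-manylinux2014_x86_64.manylinux_2_17_x86_64.whl/bodo/libs/bodosql_regexp_array_kernels.py | posix_to_re
-- ===== SOURCE A (Python) =====
-- def posix_to_re(pattern):
--     cvas__vysns = {'[:alnum:]': 'A-Za-z0-9', '[:alpha:]': 'A-Za-z',
--         '[:ascii:]': '\x01-\x7f', '[:blank:]': ' \t', '[:cntrl:]':
--         '\x01-\x1f\x7f', '[:digit:]': '0-9', '[:graph:]': '!-~',
--         '[:lower:]': 'a-z', '[:print:]': ' -~', '[:punct:]':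
--         '\\]\\[!"#$%&\'()*+,./:;<=>?@\\^_`{|}~-', '[:space:]':
--         ' \t\r\n\x0b\x0c', '[:upper:]': 'A-Z', '[:word:]': 'A-Za-z0-9_',
--         '[:xdigit:]': 'A-Fa-f0-9'}
--     for fcr__jkxk in cvas__vysns:
--         pattern = pattern.replace(fcr__jkxk, cvas__vysns[fcr__jkxk])
--     return pattern
-- ===== SOURCE B (Python) =====
-- POSIX_CLASSES = [
--     ("[:alnum:]", "A-Za-z0-9"),
--     ("[:alpha:]", "A-Za-z"),
--     ("[:ascii:]", "\x01-\x7f"),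
--     ("[:blank:]", " \t"),
--     ("[:cntrl:]", "\x01-\x1f\x7f"),
--     ("[:digit:]", "0-9"),
--     ("[:graph:]", "!-~"),
--     ("[:lower:]", "a-z"),
--     ("[:print:]", " -~"),
--     ("[:punct:]", "\\]\\[!\"#$%&'()*+,./:;<=>?@\\^_`{|}~-"),
--     ("[:space:]", " \t\r\n\x0b\x0c"),
--     ("[:upper:]", "A-Z"),
--     ("[:word:]", "A-Za-z0-9_"),
--     ("[:xdigit:]", "A-Fa-f0-9"),
-- ]
--
--
-- def posix_to_re(pattern):
--     out = []
--     i = 0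
--     n = len(pattern)
--     while i < n:
--         for key, val in POSIX_CLASSES:
--             if pattern.startswith(key, i):
--                 out.append(val)
--                 i += len(key)
--                 break
--         else:
--             out.append(pattern[i])
--             i += 1
--     return "".join(out)
-- ===== Notes on version B (the rewrite author's own statement) =====
-- stated objective: alternative
-- what changed: A rewrites the whole string 14 times with sequential str.replace passes; B makes a single left-to-right tokenizing pass, emitting the replacement of the first POSIX token matching at each position (valid because no replacement value can create or destroy a token occurrence).
import Mathlib
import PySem

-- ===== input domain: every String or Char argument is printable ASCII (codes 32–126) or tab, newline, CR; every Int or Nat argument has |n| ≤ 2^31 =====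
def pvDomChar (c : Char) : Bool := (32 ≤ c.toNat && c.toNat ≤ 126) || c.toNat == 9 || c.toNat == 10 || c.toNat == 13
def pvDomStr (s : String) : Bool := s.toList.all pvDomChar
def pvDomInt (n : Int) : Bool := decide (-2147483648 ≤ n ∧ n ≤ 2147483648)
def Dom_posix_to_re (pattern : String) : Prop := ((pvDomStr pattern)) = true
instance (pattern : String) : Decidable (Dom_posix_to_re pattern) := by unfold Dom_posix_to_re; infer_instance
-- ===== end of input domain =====

-- B replaces A's 14 sequential full-string str.replace passes by ONE left-to-right tokenizing
-- pass (at each position the first matching POSIX token is emitted as its replacement).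

-- ===== PORT A =====
-- the dict literal of A, as an association list in insertion order
def pvTableA : List (String × String) :=
  [("[:alnum:]", "A-Za-z0-9"), ("[:alpha:]", "A-Za-z"),
   ("[:ascii:]", "\x01-\x7f"), ("[:blank:]", " \t"),
   ("[:cntrl:]", "\x01-\x1f\x7f"), ("[:digit:]", "0-9"),
   ("[:graph:]", "!-~"), ("[:lower:]", "a-z"), ("[:print:]", " -~"),
   ("[:punct:]", "\\]\\[!\"#$%&'()*+,./:;<=>?@\\^_`{|}~-"),
   ("[:space:]", " \t\r\n\x0b\x0c"), ("[:upper:]", "A-Z"),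
   ("[:word:]", "A-Za-z0-9_"), ("[:xdigit:]", "A-Fa-f0-9")]

-- A: for each key (in dict order) pattern = pattern.replace(key, value)
def posix_to_re (pattern : String) : String :=
  pvTableA.foldl (fun p kv => PySem.Str.replace p kv.1 kv.2) pattern

-- ===== PORT B =====
-- B's table (the same 14 pairs), on code points
def pvTableB : List (List Char × List Char) :=
  [("[:alnum:]".toList, "A-Za-z0-9".toList), ("[:alpha:]".toList, "A-Za-z".toList),
   ("[:ascii:]".toList, "\x01-\x7f".toList), ("[:blank:]".toList, " \t".toList),
   ("[:cntrl:]".toList, "\x01-\x1f\x7f".toList), ("[:digit:]".toList, "0-9".toList),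
   ("[:graph:]".toList, "!-~".toList), ("[:lower:]".toList, "a-z".toList),
   ("[:print:]".toList, " -~".toList),
   ("[:punct:]".toList, "\\]\\[!\"#$%&'()*+,./:;<=>?@\\^_`{|}~-".toList),
   ("[:space:]".toList, " \t\r\n\x0b\x0c".toList), ("[:upper:]".toList, "A-Z".toList),
   ("[:word:]".toList, "A-Za-z0-9_".toList), ("[:xdigit:]".toList, "A-Fa-f0-9".toList)]

-- Source B's inner `for key, val in items: if pattern.startswith(key, i)` loop: the first
-- table entry whose key starts at the current position (the `kv.1 ≠ []` conjunct is only
-- a totality guard for the recursion below; every key of the table is nonempty)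
def pvFind (t : List (List Char × List Char)) (s : List Char) :
    Option (List Char × List Char) :=
  match t with
  | [] => none
  | kv :: rest => if kv.1 ≠ [] ∧ kv.1.isPrefixOf s then some kv else pvFind rest s

-- Source B's single left-to-right pass: emit val and jump over the key, or copy one char
-- (`rest.drop (kv.1.length - 1)` is `drop kv.1.length` of the whole list: keys are nonempty)
def pvScan (t : List (List Char × List Char)) : List Char → List Char
  | [] => []
  | c :: rest =>
    match pvFind t (c :: rest) with
    | some kv => kv.2 ++ pvScan t (rest.drop (kv.1.length - 1))
    | none => c :: pvScan t rest
termination_by s => s.length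
decreasing_by
· simp only [List.length_cons, List.length_drop]; omega
· simp only [List.length_cons]; omega

def posix_to_re_alt (pattern : String) : String :=
  String.ofList (pvScan pvTableB pattern.toList)

-- ===== PRECONDITION & SPEC =====
def Spec_posix_to_re (pattern : String) (out : String) : Prop := out = posix_to_re_alt pattern
instance (pattern : String) (out : String) : Decidable (Spec_posix_to_re pattern out) := by unfold Spec_posix_to_re; infer_instance

-- ===== CLAIM (what is proved, stated in full; the proofs are below) =====
def Claim_equal_posix_to_re : Prop := ∀ (pattern : String), Dom_posix_to_re pattern → Spec_posix_to_re pattern (posix_to_re pattern)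

-- ===== LEMMAS AND PROOFS =====

-- a key is well-shaped: it starts with "[:" and has no other '['
def pvKeyOK (k : List Char) : Bool :=
  match k with
  | a :: b :: k' => a == '[' && b == ':' && !k'.contains '['
  | _ => false

-- a value never contains "[:" and does not end in '[' (so no key can start inside it)
def pvSafeV : List Char → Bool
  | [] => true
  | [d] => d != '['
  | d :: e :: r => ((d != '[') || (e != ':')) && pvSafeV (e :: r)

-- no proper suffix of the key k is prefix-comparable with the value v
def pvNC (k v : List Char) : Bool :=
  (List.range k.length).all
    (fun j => j == 0 || (!(k.drop j).isPrefixOf v && !v.isPrefixOf (k.drop j)))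

-- keys are mutually prefix-free
def pvPF : List (List Char × List Char) → Bool
  | [] => true
  | a :: r => r.all (fun b => !a.1.isPrefixOf b.1 && !b.1.isPrefixOf a.1) && pvPF r

-- the non-interference conditions making the 14 sequential replaces equal one scan
def pvConds (t : List (List Char × List Char)) : Bool :=
  t.all (fun kv => pvKeyOK kv.1 && pvSafeV kv.2) && pvPF t &&
    t.all (fun a => t.all (fun b => pvNC b.1 a.2))

theorem pvConds_table : pvConds pvTableB = true := by decide

theorem pvConds_keyOK {t : List (List Char × List Char)} (h : pvConds t = true) :
    ∀ kv ∈ t, pvKeyOK kv.1 = true := by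
  simp only [pvConds, Bool.and_eq_true, List.all_eq_true] at h
  intro kv hkv; exact (h.1.1 kv hkv).1

theorem pvConds_safeV {t : List (List Char × List Char)} (h : pvConds t = true) :
    ∀ kv ∈ t, pvSafeV kv.2 = true := by
  simp only [pvConds, Bool.and_eq_true, List.all_eq_true] at h
  intro kv hkv; exact (h.1.1 kv hkv).2

theorem pvConds_pf {t : List (List Char × List Char)} (h : pvConds t = true) :
    pvPF t = true := by
  simp only [pvConds, Bool.and_eq_true] at h; exact h.1.2

theorem pvConds_nc {t : List (List Char × List Char)} (h : pvConds t = true) :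
    ∀ a ∈ t, ∀ b ∈ t, pvNC b.1 a.2 = true := by
  simp only [pvConds, Bool.and_eq_true, List.all_eq_true] at h
  exact h.2

theorem pvConds_tail {kv : List Char × List Char} {t : List (List Char × List Char)}
    (h : pvConds (kv :: t) = true) : pvConds t = true := by
  simp only [pvConds, pvPF, Bool.and_eq_true, List.all_eq_true] at h ⊢
  refine ⟨⟨fun x hx => h.1.1 x (List.mem_cons_of_mem _ hx), h.1.2.2⟩,
    fun a ha b hb => h.2 a (List.mem_cons_of_mem _ ha) b (List.mem_cons_of_mem _ hb)⟩

theorem pvNC_spec {k v : List Char} (h : pvNC k v = true) :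
    ∀ j, 1 ≤ j → j < k.length → ¬(k.drop j <+: v ∨ v <+: k.drop j) := by
  intro j h1 h2 hor
  simp only [pvNC, List.all_eq_true, List.mem_range] at h
  have hthis := h j h2
  rw [Bool.or_eq_true] at hthis
  rcases hthis with h0 | hb
  · simp only [beq_iff_eq] at h0; omega
  · simp only [Bool.and_eq_true, Bool.not_eq_true'] at hb
    rcases hor with hp | hp
    · rw [← List.isPrefixOf_iff_prefix] at hp; rw [hp] at hb; exact absurd hb.1 (by simp)
    · rw [← List.isPrefixOf_iff_prefix] at hp; rw [hp] at hb; exact absurd hb.2 (by simp)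

theorem pvKeyOK_shape {k : List Char} (h : pvKeyOK k = true) :
    ∃ k', k = '[' :: ':' :: k' ∧ '[' ∉ k' := by
  cases k with
  | nil => simp [pvKeyOK] at h
  | cons a k1 =>
    cases k1 with
    | nil => simp [pvKeyOK] at h
    | cons b k' =>
      simp only [pvKeyOK, Bool.and_eq_true, beq_iff_eq, Bool.not_eq_true',
        List.contains_eq_mem, decide_eq_false_iff_not] at h
      exact ⟨k', by rw [h.1.1, h.1.2], h.2⟩

theorem pvKeyOK_ne_nil {k : List Char} (h : pvKeyOK k = true) : k ≠ [] := by
  obtain ⟨k', hk, -⟩ := pvKeyOK_shape h; simp [hk]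

theorem pvScan_nil (t : List (List Char × List Char)) : pvScan t [] = [] := by
  simp [pvScan]

theorem pvScan_cons_some {t : List (List Char × List Char)} {c : Char} {rest : List Char}
    {kv : List Char × List Char} (h : pvFind t (c :: rest) = some kv) :
    pvScan t (c :: rest) = kv.2 ++ pvScan t (rest.drop (kv.1.length - 1)) := by
  rw [pvScan, h]

theorem pvScan_cons_none {t : List (List Char × List Char)} {c : Char} {rest : List Char}
    (h : pvFind t (c :: rest) = none) :
    pvScan t (c :: rest) = c :: pvScan t rest := by
  rw [pvScan, h]

theorem pvFind_none_iff {t : List (List Char × List Char)}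
    (hne : ∀ kv ∈ t, kv.1 ≠ []) (s : List Char) :
    pvFind t s = none ↔ ∀ kv ∈ t, ¬ kv.1 <+: s := by
  induction t with
  | nil => simp [pvFind]
  | cons kv rest ih =>
    have hk : kv.1 ≠ [] := hne kv (List.mem_cons_self)
    have ih' := ih (fun x hx => hne x (List.mem_cons_of_mem _ hx))
    by_cases hp : kv.1 <+: s
    · simp [pvFind, hk, hp, List.isPrefixOf_iff_prefix]
    · simp [pvFind, hk, hp, List.isPrefixOf_iff_prefix, ih']

theorem pvFind_some_spec {t : List (List Char × List Char)} {s : List Char}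
    {kv : List Char × List Char} (h : pvFind t s = some kv) :
    kv ∈ t ∧ kv.1 ≠ [] ∧ kv.1 <+: s := by
  induction t with
  | nil => simp [pvFind] at h
  | cons kv' rest ih =>
    by_cases hg : kv'.1 ≠ [] ∧ kv'.1.isPrefixOf s
    · rw [pvFind, if_pos hg] at h
      obtain rfl : kv' = kv := by injection h
      exact ⟨List.mem_cons_self, hg.1, List.isPrefixOf_iff_prefix.mp hg.2⟩
    · rw [pvFind, if_neg hg] at h
      obtain ⟨h1, h2, h3⟩ := ih h
      exact ⟨List.mem_cons_of_mem _ h1, h2, h3⟩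

theorem pvFind_eq_of_mem {t : List (List Char × List Char)} {s : List Char}
    {kv : List Char × List Char}
    (hpf : pvPF t = true)
    (hmem : kv ∈ t) (hk : kv.1 ≠ []) (hpre : kv.1 <+: s) :
    pvFind t s = some kv := by
  induction t with
  | nil => simp at hmem
  | cons kv' rest ih =>
    simp only [pvPF, Bool.and_eq_true, List.all_eq_true] at hpf
    rcases List.mem_cons.mp hmem with heq | hmem'
    · subst heq
      rw [pvFind, if_pos ⟨hk, List.isPrefixOf_iff_prefix.mpr hpre⟩]
    · have hrel := hpf.1 kv hmem'
      simp only [← Bool.not_eq_true, Bool.not_eq_eq_eq_not, Bool.not_true,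
        List.isPrefixOf_iff_prefix] at hrel
      by_cases hp : kv'.1 <+: s
      · rcases List.prefix_or_prefix_of_prefix hp hpre with h1 | h1
        · exact absurd h1 hrel.1
        · exact absurd h1 hrel.2
      · have hng : ¬(kv'.1 ≠ [] ∧ kv'.1.isPrefixOf s) := by
          rw [List.isPrefixOf_iff_prefix]; exact fun hh => hp hh.2
        rw [pvFind, if_neg hng]
        exact ih hpf.2 hmem'

-- characters of a safe value can never start a key match (keys begin "[:")
theorem pvScan_append_safe {t : List (List Char × List Char)}
    (hsh : ∀ kv ∈ t, pvKeyOK kv.1 = true) :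
    ∀ (u X : List Char), pvSafeV u = true → pvScan t (u ++ X) = u ++ pvScan t X := by
  intro u
  induction u with
  | nil => intro X _; rfl
  | cons d u' ih =>
    intro X hs
    have hnone : pvFind t (d :: (u' ++ X)) = none := by
      rw [pvFind_none_iff (fun kv hkv => pvKeyOK_ne_nil (hsh kv hkv))]
      intro kv hkv hp
      obtain ⟨k', hk, -⟩ := pvKeyOK_shape (hsh kv hkv)
      rw [hk] at hp
      rcases List.cons_prefix_cons.mp hp with ⟨hd, hp2⟩
      subst hd
      cases u' with
      | nil => simp [pvSafeV] at hs
      | cons e r =>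
        rcases List.cons_prefix_cons.mp hp2 with ⟨he, -⟩
        simp [pvSafeV, ← he] at hs
    have hs' : pvSafeV u' = true := by
      cases u' with
      | nil => rfl
      | cons e r => simp only [pvSafeV, Bool.and_eq_true] at hs; exact hs.2
    rw [List.cons_append, pvScan_cons_none hnone, ih X hs']
    rfl

-- u contains no '[', so no key can match starting inside u
theorem pvScan_append_nobr {t : List (List Char × List Char)}
    (hsh : ∀ kv ∈ t, pvKeyOK kv.1 = true) :
    ∀ (u X : List Char), '[' ∉ u → pvScan t (u ++ X) = u ++ pvScan t X := by
  intro u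
  induction u with
  | nil => intro X _; rfl
  | cons d u' ih =>
    intro X hb
    have hnone : pvFind t (d :: (u' ++ X)) = none := by
      rw [pvFind_none_iff (fun kv hkv => pvKeyOK_ne_nil (hsh kv hkv))]
      intro kv hkv hp
      obtain ⟨k', hk, -⟩ := pvKeyOK_shape (hsh kv hkv)
      rw [hk] at hp
      rcases List.cons_prefix_cons.mp hp with ⟨hd, -⟩
      exact hb (by simp [← hd])
    rw [List.cons_append, pvScan_cons_none hnone,
      ih X (fun hx => hb (List.mem_cons_of_mem _ hx))]
    rfl

-- a proper suffix of a key that is a prefix of the one-key scan output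
-- was already a prefix of the input (it can never reach into a replacement)
theorem pvSuffix_prefix_scan {k1 v1 k2 : List Char}
    (hnc : pvNC k2 v1 = true) :
    ∀ (n : Nat) (s : List Char), s.length ≤ n → ∀ j, 1 ≤ j → j < k2.length →
      k2.drop j <+: pvScan [(k1, v1)] s → k2.drop j <+: s := by
  intro n
  induction n with
  | zero =>
    intro s hs j h1 h2 hp
    obtain rfl : s = [] := List.eq_nil_of_length_eq_zero (Nat.le_zero.mp hs)
    rw [pvScan_nil] at hp
    have : k2.drop j = [] := List.prefix_nil.mp hp
    have := List.drop_eq_nil_iff.mp this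
    omega
  | succ n ih =>
    intro s hs j h1 h2 hp
    cases s with
    | nil =>
      rw [pvScan_nil] at hp
      have : k2.drop j = [] := List.prefix_nil.mp hp
      have := List.drop_eq_nil_iff.mp this
      omega
    | cons c rest =>
      cases hf : pvFind [(k1, v1)] (c :: rest) with
      | some kv =>
        rw [pvScan_cons_some hf] at hp
        have hcomp := List.prefix_or_prefix_of_prefix hp (List.prefix_append kv.2 _)
        obtain rfl : kv = (k1, v1) := by
          have := (pvFind_some_spec hf).1; simpa using this
        exact absurd hcomp (pvNC_spec hnc j h1 h2)
      | none =>
        rw [pvScan_cons_none hf] at hp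
        cases hsuf : k2.drop j with
        | nil =>
          have := List.drop_eq_nil_iff.mp hsuf; omega
        | cons d tail =>
          rw [hsuf] at hp
          rcases List.cons_prefix_cons.mp hp with ⟨hd, htail⟩
          have htail_eq : tail = k2.drop (j + 1) := by
            rw [← List.tail_drop, hsuf]
            rfl
          by_cases hte : tail = []
          · subst hd hte
            exact List.cons_prefix_cons.mpr ⟨rfl, List.nil_prefix⟩
          · have hj1 : j + 1 < k2.length := by
              by_contra hcon
              exact hte (htail_eq ▸ List.drop_eq_nil_of_le (by omega))
            have hrec := ih rest (by simp at hs; omega) (j + 1) (by omega) hj1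
              (htail_eq ▸ htail)
            subst hd
            exact List.cons_prefix_cons.mpr ⟨rfl, htail_eq ▸ hrec⟩

-- one more sequential replace on top of a scan = the scan with that key prepended
theorem pvScan_peel_aux {k1 v1 : List Char} {t : List (List Char × List Char)}
    (hc : pvConds ((k1, v1) :: t) = true) :
    ∀ (n : Nat) (s : List Char), s.length ≤ n →
      pvScan t (pvScan [(k1, v1)] s) = pvScan ((k1, v1) :: t) s := by
  have hk1OK : pvKeyOK k1 = true := pvConds_keyOK hc (k1, v1) List.mem_cons_self
  have hk1ne : k1 ≠ [] := pvKeyOK_ne_nil hk1OK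
  have hshT : ∀ kv ∈ t, pvKeyOK kv.1 = true :=
    fun kv hkv => pvConds_keyOK hc kv (List.mem_cons_of_mem _ hkv)
  have hsafe1 : pvSafeV v1 = true := pvConds_safeV hc (k1, v1) List.mem_cons_self
  have hNCt : ∀ kv ∈ t, pvNC kv.1 v1 = true := fun kv hkv =>
    pvConds_nc hc (k1, v1) List.mem_cons_self kv (List.mem_cons_of_mem _ hkv)
  have hpfT : pvPF t = true := by
    have := pvConds_pf hc
    simp only [pvPF, Bool.and_eq_true] at this
    exact this.2
  have hneT : ∀ kv ∈ t, kv.1 ≠ [] := fun kv hkv => pvKeyOK_ne_nil (hshT kv hkv)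
  intro n
  induction n with
  | zero =>
    intro s hs
    obtain rfl : s = [] := List.eq_nil_of_length_eq_zero (Nat.le_zero.mp hs)
    rw [pvScan_nil, pvScan_nil, pvScan_nil]
  | succ n ih =>
    intro s hs
    cases s with
    | nil => rw [pvScan_nil, pvScan_nil, pvScan_nil]
    | cons c rest =>
      cases hf1 : pvFind [(k1, v1)] (c :: rest) with
      | some kv =>
        obtain ⟨hmem, -, hpre⟩ := pvFind_some_spec hf1
        obtain rfl : kv = (k1, v1) := by simpa using hmem
        rw [pvScan_cons_some hf1]
        have hY : (rest.drop (k1.length - 1)).length ≤ n := by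
          simp only [List.length_cons] at hs
          simp only [List.length_drop]; omega
        rw [pvScan_append_safe hshT v1 _ hsafe1, ih _ hY]
        have hf' : pvFind ((k1, v1) :: t) (c :: rest) = some (k1, v1) := by
          rw [pvFind, if_pos ⟨hk1ne, List.isPrefixOf_iff_prefix.mpr hpre⟩]
        rw [pvScan_cons_some hf']
      | none =>
        have hnk1 : ¬ k1 <+: c :: rest := by
          have := (pvFind_none_iff (by simp [hk1ne]) (c :: rest)).mp hf1
          simpa using this
        rw [pvScan_cons_none hf1]
        have hfind_cons : pvFind ((k1, v1) :: t) (c :: rest) = pvFind t (c :: rest) := by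
          rw [pvFind, if_neg (by rw [List.isPrefixOf_iff_prefix]; exact fun hh => hnk1 hh.2)]
        cases hf2 : pvFind t (c :: rest) with
        | some kv2 =>
          obtain ⟨hmem2, hne2, hpre2⟩ := pvFind_some_spec hf2
          obtain ⟨X, hX⟩ := hpre2
          obtain ⟨k'', hk'', hbr⟩ := pvKeyOK_shape (hshT kv2 hmem2)
          have hc' : c = '[' := by
            rw [hk''] at hX
            exact (by injection hX with h1 _; exact h1.symm)
          have hrest : rest = kv2.1.tail ++ X := by
            rw [hk''] at hX ⊢
            injection hX with _ h2
            simpa using h2.symm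
          have hbr2 : '[' ∉ kv2.1.tail := by
            rw [hk'']
            intro hmem3
            rcases List.mem_cons.mp hmem3 with h | h
            · exact absurd h.symm (by decide)
            · exact hbr h
          have hscan1 : pvScan [(k1, v1)] rest = kv2.1.tail ++ pvScan [(k1, v1)] X := by
            rw [hrest]
            exact pvScan_append_nobr (by simpa [pvKeyOK] using hk1OK) _ _ hbr2
          rw [hscan1]
          have hagg : c :: (kv2.1.tail ++ pvScan [(k1, v1)] X) = kv2.1 ++ pvScan [(k1, v1)] X := by
            rw [hk'', hc']; rfl
          rw [hagg]
          have hff : pvFind t (kv2.1 ++ pvScan [(k1, v1)] X) = some kv2 :=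
            pvFind_eq_of_mem hpfT hmem2 hne2 (List.prefix_append _ _)
          have hstep : pvScan t (kv2.1 ++ pvScan [(k1, v1)] X) =
              kv2.2 ++ pvScan t (pvScan [(k1, v1)] X) := by
            cases hkk : kv2.1 with
            | nil => exact absurd hkk hne2
            | cons d tl =>
              rw [hkk, List.cons_append] at hff
              rw [List.cons_append, pvScan_cons_some hff, hkk]
              congr 2
              simp only [List.length_cons, Nat.add_sub_cancel]
              rw [List.drop_left]
          rw [hstep]
          have hXn : X.length ≤ n := by
            have : rest.length = kv2.1.tail.length + X.length := by
              rw [hrest, List.length_append]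
            simp only [List.length_cons] at hs
            have hk2len : kv2.1.tail.length + 1 = kv2.1.length := by
              rw [hk'']; simp
            omega
          rw [ih X hXn]
          have hf2' : pvFind ((k1, v1) :: t) (c :: rest) = some kv2 :=
            hfind_cons.trans hf2
          rw [pvScan_cons_some hf2']
          congr 1
          rw [hrest]
          have : kv2.1.length - 1 = kv2.1.tail.length := by rw [hk'']; simp
          rw [this, List.drop_left]
        | none =>
          have hnone' : pvFind t (c :: pvScan [(k1, v1)] rest) = none := by
            rw [pvFind_none_iff hneT]
            intro kv hkv hp
            obtain ⟨k'', hk'', -⟩ := pvKeyOK_shape (hshT kv hkv)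
            have hc' : c = '[' := by
              rw [hk''] at hp
              exact ((List.cons_prefix_cons.mp hp).1).symm
            have htl : kv.1.drop 1 <+: pvScan [(k1, v1)] rest := by
              rw [hk'']
              exact (List.cons_prefix_cons.mp (hk'' ▸ hp)).2
            have hlen : 1 < kv.1.length := by
              rw [hk'']; simp only [List.length_cons]; omega
            have := pvSuffix_prefix_scan (hNCt kv hkv) rest.length rest le_rfl 1 le_rfl
              hlen htl
            have hfull : kv.1 <+: c :: rest := by
              rw [hk'', hc']
              rw [hk''] at this
              exact List.cons_prefix_cons.mpr ⟨rfl, by simpa using this⟩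
            exact ((pvFind_none_iff hneT (c :: rest)).mp hf2) kv hkv hfull
          rw [pvScan_cons_none hnone', ih rest (by simp at hs; omega)]
          have hf2' : pvFind ((k1, v1) :: t) (c :: rest) = none :=
            hfind_cons.trans hf2
          rw [pvScan_cons_none hf2']

theorem pvScan_peel {k1 v1 : List Char} {t : List (List Char × List Char)}
    (hc : pvConds ((k1, v1) :: t) = true) (s : List Char) :
    pvScan t (pvScan [(k1, v1)] s) = pvScan ((k1, v1) :: t) s :=
  pvScan_peel_aux hc s.length s le_rfl

-- PySem's replace (with a nonempty needle) IS the one-key scan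
theorem pvReplace_go_eq {k v : List Char} (hk : k ≠ []) :
    ∀ (fuel : Nat) (l acc : List Char), l.length ≤ fuel →
      PySem.Chars.replace.go k v fuel l acc = acc.reverse ++ pvScan [(k, v)] l := by
  intro fuel
  induction fuel with
  | zero =>
    intro l acc hl
    obtain rfl : l = [] := List.eq_nil_of_length_eq_zero (Nat.le_zero.mp hl)
    rw [pvScan_nil, PySem.Chars.replace.go]
  | succ n ih =>
    intro l acc hl
    cases l with
    | nil =>
      rw [pvScan_nil, PySem.Chars.replace.go]
      all_goals simp
    | cons c t =>
      by_cases hp : k.isPrefixOf (c :: t) = true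
      · rw [PySem.Chars.replace.go, if_pos hp]
        obtain ⟨m, hm⟩ := Nat.exists_eq_succ_of_ne_zero
          (fun h0 => hk (List.eq_nil_of_length_eq_zero h0))
        have hlen : (List.drop k.length (c :: t)).length ≤ n := by
          simp only [List.length_cons] at hl
          simp only [List.length_drop, List.length_cons]; omega
        rw [ih _ _ hlen]
        have hf : pvFind [(k, v)] (c :: t) = some (k, v) := by
          rw [pvFind, if_pos ⟨hk, hp⟩]
        rw [pvScan_cons_some hf]
        have hdrop : List.drop k.length (c :: t) = t.drop (k.length - 1) := by
          rw [hm, List.drop_succ_cons, Nat.succ_sub_one]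
        rw [hdrop]
        simp
      · rw [PySem.Chars.replace.go, if_neg hp]
        rw [ih t (c :: acc) (by simp only [List.length_cons] at hl; omega)]
        have hf : pvFind [(k, v)] (c :: t) = none := by
          rw [pvFind, if_neg (fun hh => hp hh.2)]; rfl
        rw [pvScan_cons_none hf]
        simp

theorem pvReplace_eq_scan {k v : List Char} (hk : k ≠ []) (s : List Char) :
    PySem.Chars.replace s k v = pvScan [(k, v)] s := by
  rw [PySem.Chars.replace, if_neg (by simp [hk])]
  simpa using pvReplace_go_eq hk s.length s [] le_rfl

theorem pvScan_nil_table : ∀ s : List Char, pvScan [] s = s := by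
  intro s
  induction s with
  | nil => exact pvScan_nil []
  | cons c rest ih => rw [pvScan_cons_none rfl, ih]

theorem pvFold_eq_scan :
    ∀ (t : List (List Char × List Char)), pvConds t = true → ∀ s : List Char,
      t.foldl (fun l kv => PySem.Chars.replace l kv.1 kv.2) s = pvScan t s := by
  intro t
  induction t with
  | nil => intro _ s; exact (pvScan_nil_table s).symm
  | cons kv rest ih =>
    intro hc s
    obtain ⟨k1, v1⟩ := kv
    have hk : k1 ≠ [] :=
      pvKeyOK_ne_nil (pvConds_keyOK hc (k1, v1) List.mem_cons_self)
    rw [List.foldl_cons, ih (pvConds_tail hc) _, pvReplace_eq_scan hk]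
    exact pvScan_peel hc s

theorem pvFoldStr (T : List (String × String)) :
    ∀ s : String,
      (T.foldl (fun p kv => PySem.Str.replace p kv.1 kv.2) s).toList =
        (T.map (fun kv => (kv.1.toList, kv.2.toList))).foldl
          (fun l kv => PySem.Chars.replace l kv.1 kv.2) s.toList := by
  induction T with
  | nil => intro s; rfl
  | cons kv rest ih =>
    intro s
    rw [List.foldl_cons, List.map_cons, List.foldl_cons, ih, PySem.Str.toList_replace]

theorem pvTableB_eq_map :
    pvTableA.map (fun kv => (kv.1.toList, kv.2.toList)) = pvTableB := by decide

-- ===== VERDICT (by name: the statement is the Claim_ definition above) =====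
theorem posix_to_re_spec : Claim_equal_posix_to_re := by
  intro pattern _
  unfold Spec_posix_to_re posix_to_re posix_to_re_alt
  apply String.toList_inj.mp
  rw [pvFoldStr, pvTableB_eq_map, pvFold_eq_scan pvTableB pvConds_table,
    String.toList_ofList]
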